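-- pv_equiv track=rewrite | github.com/Ziyad/gpt-web-driver | src/gpt_web_driver/core/observer.py | _attrs_list_to_dict
-- ===== SOURCE A (Python) =====
-- def _attrs_list_to_dict(attrs: list[str]) -> dict[str, str]:
--     out: dict[str, str] = {}
--     it = iter(attrs)
--     for k in it:
--         try:
--             v = next(it)
--         except StopIteration:
--             break
--         out[str(k)] = str(v)
--     return out
-- ===== SOURCE B (Python) =====
-- def _attrs_list_to_dict(attrs: list[str]) -> dict[str, str]:
--     # Strided views: keys at even indices, values at odd; zip truncates a
--     # trailing unpaired key, dict(...) keeps last value per key at first position.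
--     return dict(zip((str(k) for k in attrs[::2]), (str(v) for v in attrs[1::2])))
-- ===== Notes on version B (the rewrite author's own statement) =====
-- stated objective: idiomatic
-- what changed: Replaces the explicit iterator loop with next()/StopIteration handling by dict(zip(attrs[::2], attrs[1::2])) over two strided slices, relying on zip truncation for an odd-length tail.
import Mathlib
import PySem

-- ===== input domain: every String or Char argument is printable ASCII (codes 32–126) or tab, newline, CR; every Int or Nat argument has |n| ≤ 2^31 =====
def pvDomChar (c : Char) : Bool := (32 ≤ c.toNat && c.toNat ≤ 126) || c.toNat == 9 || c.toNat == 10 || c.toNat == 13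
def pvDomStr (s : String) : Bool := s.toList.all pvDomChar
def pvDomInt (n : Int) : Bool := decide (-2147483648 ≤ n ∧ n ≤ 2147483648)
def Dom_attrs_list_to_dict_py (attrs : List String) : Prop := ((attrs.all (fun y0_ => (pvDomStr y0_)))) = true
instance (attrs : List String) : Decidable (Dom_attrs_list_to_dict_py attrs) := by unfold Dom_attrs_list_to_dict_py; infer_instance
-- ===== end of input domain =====

-- B builds the dict from two strided slices zipped, instead of A's iterator loop; same values, idiomatic decomposition.
-- ===== PORT A =====
-- 'for k in it: v = next(it) (break on StopIteration); out[str(k)] = str(v)' — two elements per step;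
-- str() on a str is the identity, so str(k)/str(v) are ported as k/v.
def attrsLoopA : List String → PySem.Dict String String → PySem.Dict String String
  | [], out => out
  | [_], out => out
  | k :: v :: rest, out => attrsLoopA rest (out.insert k v)

def attrs_list_to_dict_py (attrs : List String) : List (String × String) :=
  (attrsLoopA attrs PySem.Dict.empty).items

-- ===== PORT B =====
-- dict(zip(attrs[::2], attrs[1::2])); str() on a str is the identity.
def attrs_list_to_dict_py_alt (attrs : List String) : List (String × String) :=
  (PySem.Dict.ofList
    (((PySem.List.slice? attrs none none 2).getD []).zip
      ((PySem.List.slice? attrs (some 1) none 2).getD []))).items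

-- ===== PRECONDITION & SPEC =====
def Spec_attrs_list_to_dict_py (attrs : List String) (out : List (String × String)) : Prop := out = attrs_list_to_dict_py_alt attrs
instance (attrs : List String) (out : List (String × String)) : Decidable (Spec_attrs_list_to_dict_py attrs out) := by unfold Spec_attrs_list_to_dict_py; infer_instance

-- ===== CLAIM (what is proved, stated in full; the proofs are below) =====
def Claim_equal_attrs_list_to_dict_py : Prop := ∀ (attrs : List String), Dom_attrs_list_to_dict_py attrs → Spec_attrs_list_to_dict_py attrs (attrs_list_to_dict_py attrs)

-- ===== LEMMAS AND PROOFS =====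
-- even-index elements of xs (stride-2 view)
def stride2 {α : Type} : List α → List α
  | [] => []
  | [x] => [x]
  | x :: _ :: rest => x :: stride2 rest

-- the (key, value) pairs A's loop consumes, two at a time
def pairsOf {α : Type} : List α → List (α × α)
  | x :: y :: rest => (x, y) :: pairsOf rest
  | _ => []

lemma filterMap_range_two {α : Type} (xs : List α) :
    List.filterMap (fun k => xs[2*k]?) (List.range ((xs.length + 1) / 2)) = stride2 xs := by
  induction xs using stride2.induct with
  | case1 => simp [stride2]
  | case2 x => simp [stride2]
  | case3 x y rest ih =>
    have hc : ((x :: y :: rest).length + 1) / 2 = (rest.length + 1) / 2 + 1 := by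
      simp; omega
    rw [hc, List.range_succ_eq_map, List.filterMap_cons]
    have h0 : (x :: y :: rest)[2*0]? = some x := rfl
    rw [h0, List.filterMap_map]
    have hfun : ((fun k => (x :: y :: rest)[2*k]?) ∘ Nat.succ) = fun k => rest[2*k]? := by
      funext k
      have h2 : 2 * Nat.succ k = 2 * k + 1 + 1 := by omega
      simp [Function.comp, h2]
    rw [hfun, ih, stride2]

lemma slice2_zero {α : Type} (xs : List α) :
    PySem.List.slice? xs none none 2 = some (stride2 xs) := by
  simp only [PySem.List.slice?, PySem.List.sliceIndices]
  norm_num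
  rw [show (fun (k : Nat) => xs[(2 * (k:Int)).toNat]?) = fun k => xs[2*k]? from
      funext fun k => by rw [show ((2:Int) * (k:Int)).toNat = 2*k by omega]]
  rw [show (if 0 < xs.length then (((xs.length:Int) + 2 - 1) / 2).toNat else 0)
      = (xs.length + 1) / 2 by split <;> omega]
  rw [filterMap_range_two]

lemma stride2_cons {α : Type} (a : α) (l : List α) : stride2 (a :: l) = a :: stride2 l.tail := by
  cases l <;> simp [stride2]

lemma slice2_one {α : Type} (xs : List α) :
    PySem.List.slice? xs (some 1) none 2 = some (stride2 xs.tail) := by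
  cases xs with
  | nil => simp [PySem.List.slice?, PySem.List.sliceIndices, stride2]
  | cons x t =>
    simp only [PySem.List.slice?, PySem.List.sliceIndices]
    norm_num
    rw [show (fun (k : Nat) => (x :: t)[((1:Int) + 2 * (k:Int)).toNat]?) = fun k => t[2*k]? from
        funext fun k => by
          have h1 : ((1:Int) + 2 * (k:Int)).toNat = 2 * k + 1 := by omega
          simp [h1]]
    rw [show (if 0 < t.length then (((t.length:Int) + 2 - 1) / 2).toNat else 0)
        = (t.length + 1) / 2 by split <;> omega]
    rw [filterMap_range_two]

lemma zip_stride2 {α : Type} (xs : List α) :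
    (stride2 xs).zip (stride2 xs.tail) = pairsOf xs := by
  induction xs using stride2.induct with
  | case1 => simp [stride2, pairsOf]
  | case2 x => simp [stride2, pairsOf]
  | case3 x y rest ih =>
    rw [show (x :: y :: rest).tail = y :: rest from rfl, stride2, stride2_cons]
    simp only [List.zip_cons_cons, ih, pairsOf]

lemma loopA_eq_update (xs : List String) (d : PySem.Dict String String) :
    attrsLoopA xs d = d.update (pairsOf xs) := by
  induction xs using stride2.induct generalizing d with
  | case1 => simp [attrsLoopA, pairsOf, PySem.Dict.update]
  | case2 x => simp [attrsLoopA, pairsOf, PySem.Dict.update]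
  | case3 k v rest ih =>
    rw [show attrsLoopA (k :: v :: rest) d = attrsLoopA rest (d.insert k v) from rfl, ih]
    simp [pairsOf, PySem.Dict.update]

-- ===== VERDICT (by name: the statement is the Claim_ definition above) =====
-- ===== VERDICT (by name: the statement is the Claim_ definition above) =====
theorem attrs_list_to_dict_py_spec : Claim_equal_attrs_list_to_dict_py := by
  intro attrs _
  unfold Spec_attrs_list_to_dict_py attrs_list_to_dict_py attrs_list_to_dict_py_alt
  rw [slice2_zero, slice2_one]
  simp only [Option.getD_some]
  rw [zip_stride2, loopA_eq_update]
  rfl
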